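-- pv_equiv track=rewrite | github.com/fiddlydiddle/advent_of_code | 2025/day6/python.py | part1
-- ===== SOURCE A (Python) =====
-- def part1(input):
--     result = 0
--     current_col_idx = 0
--     col_height = len(input)
--
--     # Parse the input into columns of values
--     parsed_input = []
--     for line in input:
--         line = line.strip().split()
--         parsed_input.append(line)
--
--     # Move through input column-by-column and do the maths
--     while current_col_idx < len(parsed_input[0]):
--         operator = parsed_input[col_height - 1][current_col_idx]
--
--         # Initialize running_total to identity element for column's operation
--         running_total = 0
--         if operator == '*':
--             running_total = 1
--
--         # Total up the column
--         for row_idx in range(col_height - 1):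
--             if operator == '*':
--                 running_total *= int(parsed_input[row_idx][current_col_idx])
--             else:
--                 running_total += int(parsed_input[row_idx][current_col_idx])
--
--         # Add to total value, move to next column
--         result += running_total
--         current_col_idx += 1
--
--
--     return result
-- ===== SOURCE B (Python) =====
-- def part1(input):
--     rows = [line.strip().split() for line in input]
--     ops = rows[-1]
--     accs = [1 if ops[i] == '*' else 0 for i in range(len(rows[0]))]
--     for row in rows[:-1]:
--         accs = [acc * int(row[i]) if ops[i] == '*' else acc + int(row[i])
--                 for i, acc in enumerate(accs)]
--     return sum(accs)
-- ===== Notes on version B (the rewrite author's own statement) =====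
-- stated objective: alternative
-- what changed: Replaces A's column-by-column scan (outer loop over column indices, inner loop down each column) by a single row-major streaming pass that keeps a vector of per-column accumulators initialised from the operator row and updates all of them as each value row goes by.
import Mathlib
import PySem

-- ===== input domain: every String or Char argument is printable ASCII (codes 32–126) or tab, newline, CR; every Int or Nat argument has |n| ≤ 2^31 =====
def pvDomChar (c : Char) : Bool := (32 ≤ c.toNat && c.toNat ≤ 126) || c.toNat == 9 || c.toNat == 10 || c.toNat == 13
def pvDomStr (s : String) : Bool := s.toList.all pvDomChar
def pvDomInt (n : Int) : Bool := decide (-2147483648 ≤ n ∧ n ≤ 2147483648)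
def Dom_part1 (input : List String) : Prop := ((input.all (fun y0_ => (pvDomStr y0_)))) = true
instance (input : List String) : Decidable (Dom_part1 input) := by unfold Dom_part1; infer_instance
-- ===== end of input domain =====

-- B replaces A's column-by-column scan by a single row-major streaming pass over the value rows
-- maintaining a vector of per-column accumulators (alternative decomposition; same asymptotic cost).

-- int(s) under Pre_ (which guarantees the parse succeeds on every cell A converts)
def pvInt (s : String) : Int := (PySem.Int.ofStr? s).getD 0

-- line.strip().split(), shared tokenizer of both ports
def pvTok (line : String) : List String := PySem.Str.split₀ (PySem.Str.strip line)

-- ===== PORT A =====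
def part1 (input : List String) : Int :=
  let colHeight : Int := input.length
  let parsed : List (List String) :=
    input.foldl (fun acc line => acc ++ [pvTok line]) []
  (PySem.List.pyRange 0 ((PySem.List.pyGetD parsed 0 []).length : Int) 1).foldl
    (fun result colIdx =>
      let operator := PySem.List.pyGetD (PySem.List.pyGetD parsed (colHeight - 1) []) colIdx ""
      let init : Int := if operator = "*" then 1 else 0
      let running :=
        (PySem.List.pyRange 0 (colHeight - 1) 1).foldl
          (fun rt rowIdx =>
            if operator = "*" then
              rt * pvInt (PySem.List.pyGetD (PySem.List.pyGetD parsed rowIdx []) colIdx "")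
            else
              rt + pvInt (PySem.List.pyGetD (PySem.List.pyGetD parsed rowIdx []) colIdx ""))
          init
      result + running)
    0

-- ===== PORT B =====
def part1_alt (input : List String) : Int :=
  let rows := input.map pvTok
  let ops := PySem.List.pyGetD rows (-1) []
  let accs0 := (List.range (PySem.List.pyGetD rows 0 []).length).map
      (fun (i : Nat) => if PySem.List.pyGetD ops (i : Int) "" = "*" then (1 : Int) else 0)
  let accs := (PySem.List.slice rows none (some (-1))).foldl
      (fun accs row => (PySem.List.enumerate accs).map
        (fun p => if PySem.List.pyGetD ops p.1 "" = "*" then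
                    p.2 * pvInt (PySem.List.pyGetD row p.1 "")
                  else
                    p.2 + pvInt (PySem.List.pyGetD row p.1 "")))
      accs0
  accs.sum

-- ===== PRECONDITION & SPEC =====
-- Pre_ is exactly the inputs where Python A returns: input nonempty (else parsed_input[0] raises
-- IndexError), every line tokenizes to at least as many fields as the first line (else IndexError
-- on a scanned column), and every scanned value cell parses as an int (else ValueError).
def Pre_part1 (input : List String) : Prop :=
  input ≠ [] ∧
  (∀ line ∈ input, (pvTok (input.headD "")).length ≤ (pvTok line).length) ∧
  (∀ line ∈ input.dropLast, ∀ c ∈ (pvTok line).take (pvTok (input.headD "")).length,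
      (PySem.Int.ofStr? c).isSome = true)
instance (input : List String) : Decidable (Pre_part1 input) := by unfold Pre_part1; infer_instance

def pvWitness_part1 : List String := ["1 2", "30 4", "+ *"]

def Spec_part1 (input : List String) (out : Int) : Prop := out = part1_alt input
instance (input : List String) (out : Int) : Decidable (Spec_part1 input out) := by unfold Spec_part1; infer_instance

-- ===== CLAIM (what is proved, stated in full; the proofs are below) =====
def Claim_equal_part1 : Prop := ∀ (input : List String), Dom_part1 input → Pre_part1 input → Spec_part1 input (part1 input)

-- ===== LEMMAS AND PROOFS =====

-- proof-side abbreviations for A's per-column computation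
def pvAop (P : List (List String)) (i : Nat) : String := (P.getD (P.length - 1) []).getD i ""

def pvAcol (P : List (List String)) (i : Nat) : Int :=
  P.dropLast.foldl
    (fun rt row => if pvAop P i = "*" then rt * pvInt (row.getD i "") else rt + pvInt (row.getD i ""))
    (if pvAop P i = "*" then 1 else 0)

theorem pvRange_natCast (n : Nat) :
    PySem.List.pyRange 0 (n : Int) 1 = (List.range n).map Int.ofNat := by
  rw [PySem.List.pyRange_one]; simp

-- A's inner row loop over indices = a fold over the value rows themselves
theorem inner_eq (P : List (List String)) (op : String) (i : Nat) (init : Int) :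
    (PySem.List.pyRange 0 ((P.dropLast.length : Nat) : Int) 1).foldl
      (fun rt rowIdx =>
        if op = "*" then rt * pvInt (PySem.List.pyGetD (PySem.List.pyGetD P rowIdx []) (Int.ofNat i) "")
        else rt + pvInt (PySem.List.pyGetD (PySem.List.pyGetD P rowIdx []) (Int.ofNat i) "")) init
    = P.dropLast.foldl
        (fun rt row => if op = "*" then rt * pvInt (row.getD i "") else rt + pvInt (row.getD i "")) init := by
  rw [PySem.List.foldl_congr_mem _ _
      (fun rt rowIdx =>
        if op = "*" then rt * pvInt (PySem.List.pyGetD (PySem.List.pyGetD P.dropLast rowIdx []) (Int.ofNat i) "")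
        else rt + pvInt (PySem.List.pyGetD (PySem.List.pyGetD P.dropLast rowIdx []) (Int.ofNat i) "")) _
      (by
        intro acc x hx
        rw [PySem.List.mem_pyRange_one] at hx
        have hle : P.dropLast.length ≤ P.length := by
          rw [List.length_dropLast]; omega
        have h1 : PySem.List.pyGetD P x [] = PySem.List.pyGetD P.dropLast x [] := by
          rw [PySem.List.pyGetD_eq_getElem P [] hx.1 (lt_of_lt_of_le hx.2 (by exact_mod_cast hle)),
              PySem.List.pyGetD_eq_getElem P.dropLast [] hx.1 hx.2]
          exact (List.getElem_dropLast _).symm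
        rw [h1])]
  rw [PySem.List.foldl_pyRange_zero_pyGetD' P.dropLast []
      (fun rt row =>
        if op = "*" then rt * pvInt (PySem.List.pyGetD row (Int.ofNat i) "")
        else rt + pvInt (PySem.List.pyGetD row (Int.ofNat i) "")) init]
  simp only [Int.ofNat_eq_natCast, PySem.List.pyGetD_natCast]

-- A in normal form: sum over column indices of pvAcol
set_option maxHeartbeats 1000000 in
theorem partA_eq (l0 : String) (rest : List String) :
    part1 (l0 :: rest) =
      ((List.range (pvTok l0).length).map
        (fun i => pvAcol ((l0 :: rest).map pvTok) i)).sum := by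
  simp only [part1]
  rw [PySem.List.foldl_append_singleton_eq_map]
  simp only [List.nil_append, List.map_cons, PySem.List.pyGetD_zero_cons]
  rw [pvRange_natCast, List.foldl_map, PySem.List.foldl_add]
  simp only [zero_add]
  refine congrArg List.sum (List.map_congr_left ?_)
  intro i hi
  have hb : ((((l0 :: rest).length : Nat) : Int) - 1)
      = (((pvTok l0 :: List.map pvTok rest).dropLast.length : Nat) : Int) := by simp
  rw [hb, inner_eq]
  simp only [pvAcol, pvAop, Int.ofNat_eq_natCast, PySem.List.pyGetD_natCast, List.length_dropLast]
  rfl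

-- the per-column fold B performs, named for the statements below
def pvReduceCol (op : String) (R : List (List String)) (i : Nat) : Int :=
  R.foldl (fun a row => if op = "*" then a * pvInt (row.getD i "") else a + pvInt (row.getD i ""))
    (if op = "*" then 1 else 0)

-- mapping B's per-row update over an accumulator vector of the shape (range n).map h
theorem step_eq (n : Nat) (h : Nat → Int) (F : Int × Int → Int) :
    (PySem.List.enumerate ((List.range n).map h)).map F
      = (List.range n).map (fun (i : Nat) => F ((i : Int), h i)) := by
  apply List.ext_getElem
  · simp [PySem.List.length_enumerate]
  · intro k hk hk'
    simp [PySem.List.getElem_enumerate]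

-- the row-major fold with an accumulator vector = per-column folds (columns are independent)
theorem rowmajor_eq (R : List (List String)) (n : Nat) (f : List String → Int → Int → Int)
    (h : Nat → Int) :
    R.foldl (fun accs row => (PySem.List.enumerate accs).map
        (fun p => f row p.1 p.2)) ((List.range n).map h)
      = (List.range n).map (fun (i : Nat) => R.foldl (fun a row => f row (i : Int) a) (h i)) := by
  induction R generalizing h with
  | nil => rfl
  | cons r R ih =>
    simp only [List.foldl_cons]
    rw [step_eq n h (fun p => f r p.1 p.2)]
    exact ih (fun i => f r (i : Int) (h i))

-- B in normal form
theorem partB_eq (l0 : String) (rest : List String) :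
    part1_alt (l0 :: rest) =
      ((List.range (pvTok l0).length).map (fun i =>
        pvReduceCol ((((l0 :: rest).map pvTok).getLast (by simp)).getD i "")
          (((l0 :: rest).map pvTok).dropLast) i)).sum := by
  simp only [part1_alt, List.map_cons]
  rw [PySem.List.slice_to_neg_one]
  simp only [PySem.List.pyGetD_neg_one _ _ (by simp : pvTok l0 :: List.map pvTok rest ≠ []),
    PySem.List.pyGetD_zero_cons]
  rw [rowmajor_eq ((pvTok l0 :: List.map pvTok rest).dropLast) (pvTok l0).length
      (fun row i a =>
        if PySem.List.pyGetD ((pvTok l0 :: List.map pvTok rest).getLast (by simp)) i "" = "*" then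
          a * pvInt (PySem.List.pyGetD row i "") else a + pvInt (PySem.List.pyGetD row i ""))]
  refine congrArg List.sum (List.map_congr_left ?_)
  intro i _
  simp only [pvReduceCol, PySem.List.pyGetD_natCast]

theorem col_eq (P : List (List String)) (hP : P ≠ []) (i : Nat) :
    pvAcol P i = pvReduceCol ((P.getLast hP).getD i "") P.dropLast i := by
  have hlt : P.length - 1 < P.length := Nat.sub_lt (List.length_pos_of_ne_nil hP) one_pos
  have hrow : P.getD (P.length - 1) [] = P.getLast hP := by
    rw [List.getLast_eq_getElem, List.getD_eq_getElem _ _ hlt]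
  unfold pvAcol pvReduceCol pvAop
  rw [hrow]

-- ===== VERDICT (by name: the statement is the Claim_ definition above) =====
theorem part1_spec : Claim_equal_part1 := by
  intro input hdom hpre
  obtain ⟨hne, hlen, _⟩ := hpre
  cases input with
  | nil => exact absurd rfl hne
  | cons l0 rest =>
    unfold Spec_part1
    rw [partA_eq, partB_eq]
    refine congrArg List.sum (List.map_congr_left ?_)
    intro i _
    exact col_eq _ (by simp) i
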